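-- pv_equiv track=rewrite | github.com/aurpo1/1day-1commit | programmers/babbling.py | solution
-- ===== SOURCE A (Python) =====
-- def solution(babbling):
--     answer = 0
--     possible = ["aya", "ye", "woo", "ma"]
--
--     for i in babbling:
--         word = ""
--         comp = []
--         for j in list(i):
--             word += j
--             if (word in possible):
--                 if (len(comp) == 0 or comp[-1] != word):
--                     comp.append(word)
--                     word = ""
--         if len("".join(comp)) == len(i):
--             answer += 1
--
--     return answer
-- ===== SOURCE B (Python) =====
-- # B: token-level recursive-descent parser (consume whole sounds, track previous
-- # sound) instead of A's char-by-char buffer accumulation with a component list.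
-- SOUNDS = ("aya", "ye", "woo", "ma")
--
-- def _ok(rest, prev):
--     if not rest:
--         return True
--     for s in SOUNDS:
--         if s != prev and rest.startswith(s):
--             return _ok(rest[len(s):], s)
--     return False
--
-- def solution(babbling):
--     return sum(_ok(w, None) for w in babbling)
-- ===== Notes on version B (the rewrite author's own statement) =====
-- stated objective: alternative
-- what changed: Replaces A's char-by-char buffer accumulation with a component list and a final joined-length comparison by a token-level recursive-descent parser that consumes whole sounds via startswith while tracking only the previous sound, counting accepted words.
import Mathlib
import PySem

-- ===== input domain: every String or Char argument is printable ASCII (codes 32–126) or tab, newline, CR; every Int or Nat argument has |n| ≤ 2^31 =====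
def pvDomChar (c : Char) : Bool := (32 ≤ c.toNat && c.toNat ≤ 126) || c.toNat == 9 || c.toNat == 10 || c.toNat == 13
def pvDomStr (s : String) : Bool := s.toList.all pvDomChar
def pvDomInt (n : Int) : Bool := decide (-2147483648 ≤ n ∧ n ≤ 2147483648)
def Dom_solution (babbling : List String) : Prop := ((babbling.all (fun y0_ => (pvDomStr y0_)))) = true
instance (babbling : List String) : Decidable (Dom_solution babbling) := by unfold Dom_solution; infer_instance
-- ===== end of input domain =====

-- B replaces A's char-by-char buffer accumulation (with a components list and a
-- joined-length test) by a token-level recursive-descent parser that consumes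
-- whole sounds and tracks only the previous sound; objective: alternative.

-- ===== PORT A =====
-- possible = ["aya", "ye", "woo", "ma"]  (strings handled as List Char, exact for the port)
def possibleA : List (List Char) := [['a','y','a'], ['y','e'], ['w','o','o'], ['m','a']]

-- the body of A's inner loop: word += j; if word in possible: if len(comp)==0 or comp[-1]!=word: comp.append(word); word=""
def stepA (st : List Char × List (List Char)) (j : Char) : List Char × List (List Char) :=
  if st.1 ++ [j] ∈ possibleA then
    if st.2.length = 0 ∨ ¬ st.2.getLast? = some (st.1 ++ [j]) then ([], st.2 ++ [st.1 ++ [j]])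
    else (st.1 ++ [j], st.2)
  else (st.1 ++ [j], st.2)

def solution (babbling : List String) : Int :=
  babbling.foldl (fun answer i =>
    if ((i.toList.foldl stepA ([], [])).2.flatten.length = i.toList.length)
    then answer + 1 else answer) 0

-- ===== PORT B =====
-- _ok(rest, prev): the for-loop over SOUNDS unrolled in order; rest[len(s):] is a
-- nonnegative-literal slice, hence List.drop; rest.startswith(s) via PySem.Chars.startswith.
def okB (rest : List Char) (prev : Option (List Char)) : Bool :=
  if h : rest = [] then true
  else if some ['a','y','a'] ≠ prev ∧ PySem.Chars.startswith rest ['a','y','a'] = true then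
    okB (rest.drop 3) (some ['a','y','a'])
  else if some ['y','e'] ≠ prev ∧ PySem.Chars.startswith rest ['y','e'] = true then
    okB (rest.drop 2) (some ['y','e'])
  else if some ['w','o','o'] ≠ prev ∧ PySem.Chars.startswith rest ['w','o','o'] = true then
    okB (rest.drop 3) (some ['w','o','o'])
  else if some ['m','a'] ≠ prev ∧ PySem.Chars.startswith rest ['m','a'] = true then
    okB (rest.drop 2) (some ['m','a'])
  else false
termination_by rest.length
decreasing_by
  all_goals
    simp only [List.length_drop]
    have h0 : 0 < rest.length := List.length_pos_of_ne_nil h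
    omega

def solution_alt (babbling : List String) : Int :=
  babbling.foldl (fun n w_ => n + (if okB w_.toList none then 1 else 0)) 0

-- ===== PRECONDITION & SPEC =====
def Spec_solution (babbling : List String) (out : Int) : Prop := out = solution_alt babbling
instance (babbling : List String) (out : Int) : Decidable (Spec_solution babbling out) := by unfold Spec_solution; infer_instance

-- ===== CLAIM (what is proved, stated in full; the proofs are below) =====
def Claim_equal_solution : Prop := ∀ (babbling : List String), Dom_solution babbling → Spec_solution babbling (solution babbling)

-- ===== LEMMAS AND PROOFS =====

lemma step_nomatch (st : List Char × List (List Char)) (j : Char)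
    (h : st.1 ++ [j] ∉ possibleA) : stepA st j = (st.1 ++ [j], st.2) := by
  simp [stepA, h]

lemma step_emit (st : List Char × List (List Char)) (j : Char)
    (hin : st.1 ++ [j] ∈ possibleA)
    (h : st.2.length = 0 ∨ ¬ st.2.getLast? = some (st.1 ++ [j])) :
    stepA st j = ([], st.2 ++ [st.1 ++ [j]]) := by
  simp only [stepA]
  rw [if_pos hin, if_pos h]

lemma step_block (st : List Char × List (List Char)) (j : Char)
    (hin : st.1 ++ [j] ∈ possibleA)
    (hl : st.2.getLast? = some (st.1 ++ [j])) :
    stepA st j = (st.1 ++ [j], st.2) := by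
  have hne : st.2 ≠ [] := by intro e; simp [e] at hl
  simp [stepA, hin, hl, hne, List.length_eq_zero_iff]

-- conservation: chars are never dropped, only moved from word into comp
lemma flatten_inv : ∀ (w word : List Char) (comp : List (List Char)),
    (w.foldl stepA (word, comp)).2.flatten ++ (w.foldl stepA (word, comp)).1
      = comp.flatten ++ word ++ w := by
  intro w
  induction w with
  | nil => intro word comp; simp
  | cons j t ih =>
    intro word comp
    simp only [List.foldl_cons]
    by_cases hin : word ++ [j] ∈ possibleA
    · by_cases hcond : comp.length = 0 ∨ ¬ comp.getLast? = some (word ++ [j])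
      · rw [show stepA (word, comp) j = ([], comp ++ [word ++ [j]]) from step_emit _ _ hin hcond]
        rw [ih]
        simp
      · push_neg at hcond
        rw [show stepA (word, comp) j = (word ++ [j], comp) from step_block _ _ hin hcond.2]
        rw [ih]; simp
    · rw [show stepA (word, comp) j = (word ++ [j], comp) from step_nomatch _ _ hin]
      rw [ih]; simp

lemma accept_iff (w : List Char) :
    ((w.foldl stepA ([], [])).2.flatten.length = w.length) ↔ (w.foldl stepA ([], [])).1 = [] := by
  have h := flatten_inv w [] []
  simp only [List.flatten_nil, List.nil_append] at h
  have hlen := congrArg List.length h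
  simp only [List.length_append] at hlen
  constructor
  · intro hl
    exact List.eq_nil_of_length_eq_zero (by omega)
  · intro he
    rw [he] at hlen
    simpa using hlen

-- once the buffer is nonempty and a prefix of no sound, it can never empty again
lemma doom : ∀ (w word : List Char) (comp : List (List Char)), word ≠ [] →
    (∀ s ∈ possibleA, ¬ word <+: s) → (w.foldl stepA (word, comp)).1 ≠ [] := by
  intro w
  induction w with
  | nil => intro word comp hne _; simpa using hne
  | cons j t ih =>
    intro word comp hne hnp
    have hin : word ++ [j] ∉ possibleA := by
      intro hmem
      exact hnp _ hmem ⟨[j], rfl⟩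
    simp only [List.foldl_cons]
    rw [step_nomatch _ _ hin]
    refine ih (word ++ [j]) comp (by simp) ?_
    intro s hs hp
    exact hnp s hs (((List.prefix_append word [j]).trans hp))

lemma len_possible : ∀ s ∈ possibleA, s.length ≤ 3 := by decide

lemma np_len3 (v : List Char) (h3 : v.length = 3) (hnm : v ∉ possibleA) :
    ∀ s ∈ possibleA, ¬ v <+: s := by
  intro s hs hp
  have hle := hp.length_le
  fin_cases hs <;> simp_all
  · exact hnm (by simpa using hp.eq_of_length (by simpa using h3) ▸ List.mem_cons_self ..)
  · exact hnm (by rw [hp.eq_of_length (by simp [h3])]; decide)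

lemma np_len4 (v : List Char) (h4 : 4 ≤ v.length) : ∀ s ∈ possibleA, ¬ v <+: s := by
  intro s hs hp
  have := hp.length_le
  have := len_possible s hs
  omega

lemma npre (v : List Char) (ha : ¬ v <+: ['a','y','a']) (hy : ¬ v <+: ['y','e'])
    (hw : ¬ v <+: ['w','o','o']) (hm : ¬ v <+: ['m','a']) : ∀ s ∈ possibleA, ¬ v <+: s := by
  intro s hs
  fin_cases hs <;> assumption

-- if no sound is a prefix of the (nonempty) word, A's scan of it never re-empties the buffer
lemma deadEnd : ∀ (w : List Char) (comp : List (List Char)), w ≠ [] →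
    ¬ ['a','y','a'] <+: w → ¬ ['y','e'] <+: w → ¬ ['w','o','o'] <+: w → ¬ ['m','a'] <+: w →
    (w.foldl stepA ([], comp)).1 ≠ [] := by
  rintro (_ | ⟨c, t⟩) comp hne ha hy hw hm
  · exact absurd rfl hne
  simp only [List.foldl_cons]
  rw [step_nomatch ([], comp) c (by simp [possibleA])]
  simp only [List.nil_append]
  by_cases hca : c = 'a'
  · subst hca
    rcases t with _ | ⟨c2, t2⟩
    · simp
    simp only [List.foldl_cons]
    rw [step_nomatch (['a'], comp) c2 (by simp [possibleA])]
    simp only [List.cons_append, List.nil_append]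
    by_cases hc2 : c2 = 'y'
    · subst hc2
      rcases t2 with _ | ⟨c3, t3⟩
      · simp
      have hc3 : c3 ≠ 'a' := by rintro rfl; exact ha ⟨t3, rfl⟩
      simp only [List.foldl_cons]
      rw [step_nomatch (['a','y'], comp) c3 (by simp [possibleA, hc3])]
      simp only [List.cons_append, List.nil_append]
      exact doom t3 _ comp (by simp) (np_len3 _ rfl (by simp [possibleA, hc3]))
    · exact doom t2 _ comp (by simp)
        (npre _ (by simp [List.cons_prefix_cons, hc2]) (by simp [List.cons_prefix_cons])
          (by simp [List.cons_prefix_cons]) (by simp [List.cons_prefix_cons]))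
  by_cases hcy : c = 'y'
  · subst hcy
    rcases t with _ | ⟨c2, t2⟩
    · simp
    have hc2 : c2 ≠ 'e' := by rintro rfl; exact hy ⟨t2, rfl⟩
    simp only [List.foldl_cons]
    rw [step_nomatch (['y'], comp) c2 (by simp [possibleA, hc2])]
    simp only [List.cons_append, List.nil_append]
    exact doom t2 _ comp (by simp)
      (npre _ (by simp [List.cons_prefix_cons]) (by simp [List.cons_prefix_cons, hc2])
        (by simp [List.cons_prefix_cons]) (by simp [List.cons_prefix_cons]))
  by_cases hcw : c = 'w'
  · subst hcw
    rcases t with _ | ⟨c2, t2⟩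
    · simp
    simp only [List.foldl_cons]
    rw [step_nomatch (['w'], comp) c2 (by simp [possibleA])]
    simp only [List.cons_append, List.nil_append]
    by_cases hc2 : c2 = 'o'
    · subst hc2
      rcases t2 with _ | ⟨c3, t3⟩
      · simp
      have hc3 : c3 ≠ 'o' := by rintro rfl; exact hw ⟨t3, rfl⟩
      simp only [List.foldl_cons]
      rw [step_nomatch (['w','o'], comp) c3 (by simp [possibleA, hc3])]
      simp only [List.cons_append, List.nil_append]
      exact doom t3 _ comp (by simp) (np_len3 _ rfl (by simp [possibleA, hc3]))
    · exact doom t2 _ comp (by simp)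
        (npre _ (by simp [List.cons_prefix_cons]) (by simp [List.cons_prefix_cons])
          (by simp [List.cons_prefix_cons, hc2]) (by simp [List.cons_prefix_cons]))
  by_cases hcm : c = 'm'
  · subst hcm
    rcases t with _ | ⟨c2, t2⟩
    · simp
    have hc2 : c2 ≠ 'a' := by rintro rfl; exact hm ⟨t2, rfl⟩
    simp only [List.foldl_cons]
    rw [step_nomatch (['m'], comp) c2 (by simp [possibleA, hc2])]
    simp only [List.cons_append, List.nil_append]
    exact doom t2 _ comp (by simp)
      (npre _ (by simp [List.cons_prefix_cons]) (by simp [List.cons_prefix_cons])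
        (by simp [List.cons_prefix_cons]) (by simp [List.cons_prefix_cons, hc2]))
  · exact doom t _ comp (by simp)
      (npre _ (by simp [List.cons_prefix_cons, hca]) (by simp [List.cons_prefix_cons, hcy])
        (by simp [List.cons_prefix_cons, hcw]) (by simp [List.cons_prefix_cons, hcm]))

-- the heart: A's greedy fold empties its buffer iff B's parser accepts
lemma main : ∀ (n : Nat) (w : List Char) (prev : Option (List Char)) (comp : List (List Char)),
    w.length ≤ n → comp.getLast? = prev →
    (((w.foldl stepA ([], comp)).1 = []) ↔ okB w prev = true) := by
  intro n
  induction n with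
  | zero =>
    intro w prev comp hlen hlast
    have hw0 : w = [] := List.eq_nil_of_length_eq_zero (by omega)
    subst hw0
    simp [okB]
  | succ n ih =>
    intro w prev comp hlen hlast
    by_cases haya : ['a','y','a'] <+: w
    · obtain ⟨r, rfl⟩ := haya
      simp only [List.cons_append, List.nil_append] at hlen ⊢
      have hsw : PySem.Chars.startswith ('a'::'y'::'a'::r) ['a','y','a'] = true :=
        (PySem.Chars.startswith_iff _ _).mpr ⟨r, rfl⟩
      simp only [List.foldl_cons]
      rw [step_nomatch ([], comp) 'a' (by simp [possibleA])]
      simp only [List.cons_append, List.nil_append]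
      rw [step_nomatch (['a'], comp) 'y' (by simp [possibleA])]
      simp only [List.cons_append, List.nil_append]
      by_cases hp : prev = some ['a','y','a']
      · rw [step_block (['a','y'], comp) 'a' (by simp [possibleA]) (by rw [hlast, hp]; rfl)]
        simp only [List.cons_append, List.nil_append]
        have hR : okB ('a'::'y'::'a'::r) prev = false := by
          rw [okB.eq_def]
          simp [hp, PySem.Chars.startswith_iff, List.cons_prefix_cons]
        rw [hR]
        simp only [Bool.false_eq_true, iff_false]
        rcases r with _ | ⟨cx, tx⟩
        · simp
        · simp only [List.foldl_cons]
          rw [step_nomatch (['a','y','a'], comp) cx (by simp [possibleA])]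
          simp only [List.cons_append, List.nil_append]
          exact doom tx _ comp (by simp) (np_len4 _ (by simp))
      · rw [step_emit (['a','y'], comp) 'a' (by simp [possibleA])
          (Or.inr (by intro hh; rw [hlast] at hh; exact hp hh))]
        have hIH := ih r (some ['a','y','a']) (comp ++ [['a','y','a']])
          (by simp only [List.length_cons] at hlen; omega) (by simp)
        have hp' : some ['a','y','a'] ≠ prev := fun hh => hp hh.symm
        have hR : okB ('a'::'y'::'a'::r) prev = okB r (some ['a','y','a']) := by
          rw [okB.eq_def]
          simp [hp', hsw, PySem.Chars.startswith_iff, List.cons_prefix_cons]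
        rw [hR]
        exact hIH
    by_cases hye : ['y','e'] <+: w
    · obtain ⟨r, rfl⟩ := hye
      simp only [List.cons_append, List.nil_append] at hlen ⊢
      have hsw : PySem.Chars.startswith ('y'::'e'::r) ['y','e'] = true :=
        (PySem.Chars.startswith_iff _ _).mpr ⟨r, rfl⟩
      simp only [List.foldl_cons]
      rw [step_nomatch ([], comp) 'y' (by simp [possibleA])]
      simp only [List.cons_append, List.nil_append]
      by_cases hp : prev = some ['y','e']
      · rw [step_block (['y'], comp) 'e' (by simp [possibleA]) (by rw [hlast, hp]; rfl)]
        simp only [List.cons_append, List.nil_append]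
        have hR : okB ('y'::'e'::r) prev = false := by
          rw [okB.eq_def]
          simp [hp, PySem.Chars.startswith_iff, List.cons_prefix_cons]
        rw [hR]
        simp only [Bool.false_eq_true, iff_false]
        rcases r with _ | ⟨cx, tx⟩
        · simp
        · simp only [List.foldl_cons]
          rw [step_nomatch (['y','e'], comp) cx (by simp [possibleA])]
          simp only [List.cons_append, List.nil_append]
          exact doom tx _ comp (by simp) (np_len3 _ rfl (by simp [possibleA]))
      · rw [step_emit (['y'], comp) 'e' (by simp [possibleA])
          (Or.inr (by intro hh; rw [hlast] at hh; exact hp hh))]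
        have hIH := ih r (some ['y','e']) (comp ++ [['y','e']])
          (by simp only [List.length_cons] at hlen; omega) (by simp)
        have hp' : some ['y','e'] ≠ prev := fun hh => hp hh.symm
        have hR : okB ('y'::'e'::r) prev = okB r (some ['y','e']) := by
          rw [okB.eq_def]
          simp [hp', hsw, PySem.Chars.startswith_iff, List.cons_prefix_cons]
        rw [hR]
        exact hIH
    by_cases hwoo : ['w','o','o'] <+: w
    · obtain ⟨r, rfl⟩ := hwoo
      simp only [List.cons_append, List.nil_append] at hlen ⊢
      have hsw : PySem.Chars.startswith ('w'::'o'::'o'::r) ['w','o','o'] = true :=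
        (PySem.Chars.startswith_iff _ _).mpr ⟨r, rfl⟩
      simp only [List.foldl_cons]
      rw [step_nomatch ([], comp) 'w' (by simp [possibleA])]
      simp only [List.cons_append, List.nil_append]
      rw [step_nomatch (['w'], comp) 'o' (by simp [possibleA])]
      simp only [List.cons_append, List.nil_append]
      by_cases hp : prev = some ['w','o','o']
      · rw [step_block (['w','o'], comp) 'o' (by simp [possibleA]) (by rw [hlast, hp]; rfl)]
        simp only [List.cons_append, List.nil_append]
        have hR : okB ('w'::'o'::'o'::r) prev = false := by
          rw [okB.eq_def]
          simp [hp, PySem.Chars.startswith_iff, List.cons_prefix_cons]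
        rw [hR]
        simp only [Bool.false_eq_true, iff_false]
        rcases r with _ | ⟨cx, tx⟩
        · simp
        · simp only [List.foldl_cons]
          rw [step_nomatch (['w','o','o'], comp) cx (by simp [possibleA])]
          simp only [List.cons_append, List.nil_append]
          exact doom tx _ comp (by simp) (np_len4 _ (by simp))
      · rw [step_emit (['w','o'], comp) 'o' (by simp [possibleA])
          (Or.inr (by intro hh; rw [hlast] at hh; exact hp hh))]
        have hIH := ih r (some ['w','o','o']) (comp ++ [['w','o','o']])
          (by simp only [List.length_cons] at hlen; omega) (by simp)
        have hp' : some ['w','o','o'] ≠ prev := fun hh => hp hh.symm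
        have hR : okB ('w'::'o'::'o'::r) prev = okB r (some ['w','o','o']) := by
          rw [okB.eq_def]
          simp [hp', hsw, PySem.Chars.startswith_iff, List.cons_prefix_cons]
        rw [hR]
        exact hIH
    by_cases hma : ['m','a'] <+: w
    · obtain ⟨r, rfl⟩ := hma
      simp only [List.cons_append, List.nil_append] at hlen ⊢
      have hsw : PySem.Chars.startswith ('m'::'a'::r) ['m','a'] = true :=
        (PySem.Chars.startswith_iff _ _).mpr ⟨r, rfl⟩
      simp only [List.foldl_cons]
      rw [step_nomatch ([], comp) 'm' (by simp [possibleA])]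
      simp only [List.cons_append, List.nil_append]
      by_cases hp : prev = some ['m','a']
      · rw [step_block (['m'], comp) 'a' (by simp [possibleA]) (by rw [hlast, hp]; rfl)]
        simp only [List.cons_append, List.nil_append]
        have hR : okB ('m'::'a'::r) prev = false := by
          rw [okB.eq_def]
          simp [hp, PySem.Chars.startswith_iff, List.cons_prefix_cons]
        rw [hR]
        simp only [Bool.false_eq_true, iff_false]
        rcases r with _ | ⟨cx, tx⟩
        · simp
        · simp only [List.foldl_cons]
          rw [step_nomatch (['m','a'], comp) cx (by simp [possibleA])]
          simp only [List.cons_append, List.nil_append]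
          exact doom tx _ comp (by simp) (np_len3 _ rfl (by simp [possibleA]))
      · rw [step_emit (['m'], comp) 'a' (by simp [possibleA])
          (Or.inr (by intro hh; rw [hlast] at hh; exact hp hh))]
        have hIH := ih r (some ['m','a']) (comp ++ [['m','a']])
          (by simp only [List.length_cons] at hlen; omega) (by simp)
        have hp' : some ['m','a'] ≠ prev := fun hh => hp hh.symm
        have hR : okB ('m'::'a'::r) prev = okB r (some ['m','a']) := by
          rw [okB.eq_def]
          simp [hp', hsw, PySem.Chars.startswith_iff, List.cons_prefix_cons]
        rw [hR]
        exact hIH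
    · rcases w with _ | ⟨c, t⟩
      · simp [okB]
      have hR : okB (c :: t) prev = false := by
        rw [okB.eq_def]
        simp [PySem.Chars.startswith_iff, haya, hye, hwoo, hma]
      rw [hR]
      simp only [Bool.false_eq_true, iff_false]
      exact deadEnd (c :: t) comp (by simp) haya hye hwoo hma

lemma word_iff (i : String) :
    ((i.toList.foldl stepA ([], [])).2.flatten.length = i.toList.length) ↔ okB i.toList none = true := by
  rw [accept_iff]
  exact main i.toList.length i.toList none [] le_rfl rfl

lemma fold_eq : ∀ (l : List String) (acc : Int),
    l.foldl (fun answer i =>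
      if ((i.toList.foldl stepA ([], [])).2.flatten.length = i.toList.length)
      then answer + 1 else answer) acc
    = l.foldl (fun n w_ => n + (if okB w_.toList none then 1 else 0)) acc := by
  intro l
  induction l with
  | nil => intro acc; rfl
  | cons i t ih =>
    intro acc
    simp only [List.foldl_cons]
    rw [ih]
    congr 1
    by_cases h : okB i.toList none = true
    · rw [if_pos ((word_iff i).mpr h), if_pos h]
    · rw [if_neg (fun hc => h ((word_iff i).mp hc)), if_neg h]
      simp

theorem solution_spec : Claim_equal_solution := by
  intro babbling _
  unfold Spec_solution solution solution_alt
  exact fold_eq babbling 0
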